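-- pv_equiv track=rewrite | github.com/drachelehre/staticsite | src/htmlnode.py | markdown_to_block
-- ===== SOURCE A (Python) =====
-- block_type_para = "paragraph"
--
-- block_type_head = "heading"
--
-- block_type_code = "code"
--
-- block_type_quote = "quote"
--
-- block_type_unordered = "unordered_list"
--
-- block_type_ordered = "ordered_list"
--
-- def markdown_to_block(markdown):
--     lines = markdown.strip().split('\n')
--     blocks = []
--     current_block = []
--     current_type = None
--
--     def add_current_block():
--         if current_block:
--             blocks.append('\n'.join(current_block))
--             current_block.clear()
--
--     for line in lines:
--         line_type = block_to_block_type(line)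
--         if line_type != current_type or line_type in [block_type_head, block_type_para]:
--             add_current_block()
--             current_type = line_type
--         if line.strip():  # Ignore empty lines
--             current_block.append(line)
--
--     add_current_block()
--     return blocks
--
-- def block_to_block_type(block):
--     stripped = block.strip()
--     if stripped.startswith('#'):
--         return block_type_head
--     elif stripped.startswith('```'):
--         return block_type_code
--     elif stripped.startswith('>'):
--         return block_type_quote
--     elif stripped.startswith(('*', '-')):
--         return block_type_unordered
--     elif len(stripped) > 1 and stripped[0].isdigit() and stripped[1] == '.':
--         return block_type_ordered
--     else:
--         return block_type_para
-- ===== SOURCE B (Python) =====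
-- block_type_para = "paragraph"
--
-- block_type_head = "heading"
--
-- block_type_code = "code"
--
-- block_type_quote = "quote"
--
-- block_type_unordered = "unordered_list"
--
-- block_type_ordered = "ordered_list"
--
-- def _line_type(line):
--     s = line.strip()
--     if not s:
--         return block_type_para
--     c = s[0]
--     if c == '#':
--         return block_type_head
--     if c == '`':
--         return block_type_code if s[:3] == '```' else block_type_para
--     if c == '>':
--         return block_type_quote
--     if c in '*-':
--         return block_type_unordered
--     if c.isdigit() and s[1:2] == '.':
--         return block_type_ordered
--     return block_type_para
--
-- def markdown_to_block(markdown):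
--     # Phase 1: classify every line once.
--     typed = [(ln, _line_type(ln)) for ln in markdown.strip().split('\n')]
--     # Phase 2: group consecutive lines of the same list-like type; heading and
--     # paragraph lines stand alone, and blank lines separate without appearing.
--     blocks = []
--     i = 0
--     while i < len(typed):
--         ln, t = typed[i]
--         if t in (block_type_head, block_type_para):
--             if ln.strip():
--                 blocks.append(ln)
--             i += 1
--         else:
--             j = i + 1
--             while j < len(typed) and typed[j][1] == t:
--                 j += 1
--             blocks.append('\n'.join(ln2 for ln2, _ in typed[i:j]))
--             i = j
--     return blocks
-- ===== Notes on version B (the rewrite author's own statement) =====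
-- stated objective: alternative
-- what changed: Replaces A's stateful accumulator loop (current_block/current_type mutated per line with a flush helper) by a two-phase classify-then-group pass: every line is tagged with its type once, then consecutive runs of the same list-like type are merged while heading/paragraph lines stand alone and blank lines separate; the classifier dispatches on the first stripped character instead of a startswith chain.
import Mathlib
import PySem

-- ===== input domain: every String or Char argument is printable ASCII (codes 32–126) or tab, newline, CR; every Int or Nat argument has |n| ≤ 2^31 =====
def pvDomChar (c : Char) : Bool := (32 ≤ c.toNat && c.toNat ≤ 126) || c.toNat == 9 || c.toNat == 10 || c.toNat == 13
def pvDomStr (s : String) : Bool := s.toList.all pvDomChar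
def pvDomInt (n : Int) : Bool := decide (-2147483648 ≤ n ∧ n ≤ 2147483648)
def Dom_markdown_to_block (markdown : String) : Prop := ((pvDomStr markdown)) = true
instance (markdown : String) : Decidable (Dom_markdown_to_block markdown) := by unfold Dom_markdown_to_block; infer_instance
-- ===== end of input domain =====

-- B replaces A's stateful accumulator loop by a classify-then-group two-phase pass (objective: alternative, same cost).

-- ===== PORT A =====
-- string operations are ported on the List Char side (PySem.Chars), exact per PySem.
def block_to_block_type (block : String) : String :=
  let stripped := PySem.Chars.strip block.toList
  if PySem.Chars.startswith stripped ['#'] then "heading"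
  else if PySem.Chars.startswith stripped ['`', '`', '`'] then "code"
  else if PySem.Chars.startswith stripped ['>'] then "quote"
  else if PySem.Chars.startswith stripped ['*'] || PySem.Chars.startswith stripped ['-'] then "unordered_list"
  else if 1 < PySem.Chars.len stripped ∧ (PySem.List.pyGet? stripped 0).map PySem.Chars.isdigit = some true ∧ PySem.List.pyGet? stripped 1 = some '.' then "ordered_list"
  else "paragraph"

-- the nested helper add_current_block (current_block is threaded, not mutated)
def pyAddCurrentBlock (blocks : List String) (cur : List String) : List String :=
  if cur ≠ [] then blocks ++ [PySem.Str.join "\n" cur] else blocks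

-- the body of A's for-loop, state = (blocks, current_block, current_type)
def mtbStep (st : List String × List String × Option String) (line : String) :
    List String × List String × Option String :=
  let lt := block_to_block_type line
  let st1 := if some lt ≠ st.2.2 ∨ lt = "heading" ∨ lt = "paragraph"
             then (pyAddCurrentBlock st.1 st.2.1, ([] : List String), some lt)
             else st
  if PySem.Chars.strip line.toList ≠ [] then (st1.1, st1.2.1 ++ [line], st1.2.2) else st1

def markdown_to_block (markdown : String) : List String :=
  -- .split('\n') with the non-empty separator "\n" never raises: split? is always some here
  let lines := (PySem.Str.split? (PySem.Str.strip markdown) "\n").getD []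
  let st := lines.foldl mtbStep ([], ([] : List String), (none : Option String))
  pyAddCurrentBlock st.1 st.2.1

-- ===== PORT B =====
-- _line_type: dispatch on the first character of the stripped line
def lineTypeChars : List Char → String
  | [] => "paragraph"
  | c :: rest =>
    if c = '#' then "heading"
    else if c = '`' then (if (c :: rest).take 3 = ['`', '`', '`'] then "code" else "paragraph")
    else if c = '>' then "quote"
    else if c = '*' ∨ c = '-' then "unordered_list"
    else if PySem.Chars.isdigit c ∧ rest.take 1 = ['.'] then "ordered_list"
    else "paragraph"

def line_type (line : String) : String := lineTypeChars (PySem.Chars.strip line.toList)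

-- phase 2: group the classified lines (the while-loops, as takeWhile/dropWhile of a run)
def groupRuns : List (String × String) → List String
  | [] => []
  | (ln, t) :: rest =>
    if t = "heading" ∨ t = "paragraph" then
      (if PySem.Chars.strip ln.toList ≠ [] then [ln] else []) ++ groupRuns rest
    else
      PySem.Str.join "\n" (ln :: (rest.takeWhile (fun p => p.2 == t)).map Prod.fst)
        :: groupRuns (rest.dropWhile (fun p => p.2 == t))
  termination_by l => l.length
  decreasing_by
    · simp
    · simp only [List.length_cons]
      exact Nat.lt_succ_of_le (List.length_dropWhile_le _ rest)

def markdown_to_block_alt (markdown : String) : List String :=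
  let lines := (PySem.Str.split? (PySem.Str.strip markdown) "\n").getD []
  groupRuns (lines.map (fun ln => (ln, line_type ln)))

-- ===== PRECONDITION & SPEC =====
def Spec_markdown_to_block (markdown : String) (out : List String) : Prop := out = markdown_to_block_alt markdown
instance (markdown : String) (out : List String) : Decidable (Spec_markdown_to_block markdown out) := by unfold Spec_markdown_to_block; infer_instance

-- ===== CLAIM (what is proved, stated in full; the proofs are below) =====
def Claim_equal_markdown_to_block : Prop := ∀ (markdown : String), Dom_markdown_to_block markdown → Spec_markdown_to_block markdown (markdown_to_block markdown)

-- ===== LEMMAS AND PROOFS =====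

-- the two classifiers agree
lemma startswith_cons_single (c d : Char) (rest : List Char) :
    PySem.Chars.startswith (c :: rest) [d] = (d == c) := by
  simp [PySem.Chars.startswith, List.isPrefixOf]

lemma pyget_cons_zero (c : Char) (rest : List Char) : PySem.List.pyGet? (c :: rest) 0 = some c := by
  simp [PySem.List.pyGet?, PySem.List.pyIdx?]
lemma pyget_cons_one (c : Char) (rest : List Char) : PySem.List.pyGet? (c :: rest) 1 = rest[0]? := by
  cases rest <;> simp [PySem.List.pyGet?, PySem.List.pyIdx?]
lemma len_cons_gt_one (c : Char) (rest : List Char) : (1 < PySem.Chars.len (c :: rest)) ↔ rest ≠ [] := by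
  cases rest <;> simp [PySem.Chars.len]
lemma classify_eq (l : String) : block_to_block_type l = line_type l := by
  unfold block_to_block_type line_type
  generalize PySem.Chars.strip l.toList = cs
  match cs with
  | [] => decide
  | c :: rest =>
    simp only [lineTypeChars, startswith_cons_single, pyget_cons_zero, pyget_cons_one,
      len_cons_gt_one, Option.map_some]
    by_cases h1 : c = '#'
    · simp [h1]
    by_cases h2 : c = '`'
    · subst h2
      have : PySem.Chars.startswith ('`' :: rest) ['`','`','`'] = decide (rest.take 2 = ['`','`']) := by
        match rest with
        | [] => rfl
        | [a] => simp [PySem.Chars.startswith, List.isPrefixOf]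
        | a :: b :: r =>
          have hswap : ∀ x : Char, ('`' == x) = decide (x = '`') := by
            intro x
            by_cases hx : x = '`'
            · simp [hx]
            · simp [hx, Ne.symm hx]
          simp [PySem.Chars.startswith, List.isPrefixOf, List.take, hswap]
      rw [this]
      have h3 : (('`' :: rest).take 3 = ['`','`','`']) ↔ rest.take 2 = ['`','`'] := by
        simp [List.take]
      by_cases ht : rest.take 2 = ['`','`'] <;> simp [ht, (by decide : PySem.Chars.isdigit '`' = false)]
    by_cases h3 : c = '>'
    · simp [h3, PySem.Chars.startswith, List.isPrefixOf]
    by_cases h4 : c = '*' ∨ c = '-'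
    · have : ('*' == c) = true ∨ ('-' == c) = true := by
        rcases h4 with h | h <;> simp [h]
      rcases h4 with h | h <;> simp [h, PySem.Chars.startswith, List.isPrefixOf]
    · -- none of the special first chars
      have e1 : ('#' == c) = false := by simp [Ne.symm h1, beq_eq_false_iff_ne]
      have e2 : PySem.Chars.startswith (c :: rest) ['`','`','`'] = false := by
        simp [PySem.Chars.startswith, List.isPrefixOf, Ne.symm h2]
      have e3 : ('>' == c) = false := by simp [Ne.symm h3, beq_eq_false_iff_ne]
      have e4 : ('*' == c) = false := by
        have := (not_or.mp h4).1; simp [Ne.symm this, beq_eq_false_iff_ne]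
      have e5 : ('-' == c) = false := by
        have := (not_or.mp h4).2; simp [Ne.symm this, beq_eq_false_iff_ne]
      rw [e1, e2, e3, e4, e5]
      simp only [Bool.false_eq_true, if_false, Bool.or_self]
      have hord : (rest ≠ [] ∧ PySem.Chars.isdigit c = true ∧ rest[0]? = some '.')
          ↔ (PySem.Chars.isdigit c = true ∧ rest.take 1 = ['.']) := by
        cases rest <;> simp
      simp [h1, h2, h3, (not_or.mp h4).1, (not_or.mp h4).2]
      by_cases hd : PySem.Chars.isdigit c <;> cases rest <;> simp_all

-- a line whose strip is empty is a paragraph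
lemma strip_nil_classify (line : String) (h : PySem.Chars.strip line.toList = []) :
    block_to_block_type line = "paragraph" := by
  unfold block_to_block_type; rw [h]; decide

lemma strip_nil_lineType (line : String) (h : PySem.Chars.strip line.toList = []) :
    line_type line = "paragraph" := by
  unfold line_type; rw [h]; rfl

lemma str_join_singleton (l : String) : PySem.Str.join "\n" [l] = l := by
  apply String.toList_inj.mp
  rw [PySem.Str.toList_join]
  exact PySem.Chars.join_singleton "\n".toList l.toList

lemma groupRuns_nil : groupRuns [] = [] := by rw [groupRuns]

-- A's whole computation from a given state (foldl, then the final flush)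
def runA (st : List String × List String × Option String) (lines : List String) : List String :=
  let st' := lines.foldl mtbStep st
  pyAddCurrentBlock st'.1 st'.2.1

lemma runA_nil (st) : runA st [] = pyAddCurrentBlock st.1 st.2.1 := rfl

lemma runA_cons (st) (l : String) (ls : List String) :
    runA st (l :: ls) = runA (mtbStep st l) ls := rfl

lemma addCur_nil (blocks : List String) : pyAddCurrentBlock blocks [] = blocks := rfl

lemma addCur_ne (blocks acc : List String) (h : acc ≠ []) :
    pyAddCurrentBlock blocks acc = blocks ++ [PySem.Str.join "\n" acc] := by
  simp [pyAddCurrentBlock, h]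

-- from an empty current block the step is flush-free and state-independent
lemma mtbStep_empty (blocks : List String) (ct : Option String) (l : String) :
    mtbStep (blocks, [], ct) l =
      (blocks, if PySem.Chars.strip l.toList = [] then [] else [l], some (block_to_block_type l)) := by
  unfold mtbStep
  by_cases h : some (block_to_block_type l) ≠ ct ∨ block_to_block_type l = "heading" ∨ block_to_block_type l = "paragraph"
  · simp only [h, if_pos, addCur_nil]
    by_cases hs : PySem.Chars.strip l.toList = [] <;> simp [hs]
  · push_neg at h
    obtain ⟨hct, hh, hp⟩ := h
    by_cases hs : PySem.Chars.strip l.toList = [] <;> simp [hs, hh, hp, hct]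

-- when the flush condition fires, the step equals the step from the flushed state
lemma mtbStep_fire (blocks acc : List String) (t : Option String) (l : String)
    (h : some (block_to_block_type l) ≠ t ∨ block_to_block_type l = "heading" ∨ block_to_block_type l = "paragraph") :
    mtbStep (blocks, acc, t) l = mtbStep (pyAddCurrentBlock blocks acc, [], t) l := by
  rw [mtbStep_empty]
  unfold mtbStep
  simp only [h, if_pos]
  by_cases hs : PySem.Chars.strip l.toList = [] <;> simp [hs]

-- a line of the same (non-heading, non-paragraph) type merges into the current block
lemma mtbStep_merge (blocks acc : List String) (t : String) (l : String)
    (hlt : block_to_block_type l = t) (h1 : t ≠ "heading") (h2 : t ≠ "paragraph") :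
    mtbStep (blocks, acc, some t) l = (blocks, acc ++ [l], some t) := by
  have hs : PySem.Chars.strip l.toList ≠ [] := by
    intro hnil
    exact h2 (hlt ▸ strip_nil_classify l hnil)
  unfold mtbStep
  have hcond : ¬ (some (block_to_block_type l) ≠ some t ∨ block_to_block_type l = "heading" ∨ block_to_block_type l = "paragraph") := by
    simp [hlt, h1, h2]
  simp only [if_neg hcond]
  simp [hs]

-- the combined invariant: M (from an empty current block) and G (inside a mergeable run)
lemma runA_groupRuns (lines : List String) :
    (∀ (blocks : List String) (ct : Option String),
        runA (blocks, [], ct) lines = blocks ++ groupRuns (lines.map (fun ln => (ln, line_type ln))))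
    ∧ (∀ (blocks acc : List String) (t : String), acc ≠ [] → t ≠ "heading" → t ≠ "paragraph" →
        runA (blocks, acc, some t) lines =
          blocks ++ (PySem.Str.join "\n"
              (acc ++ ((lines.map (fun ln => (ln, line_type ln))).takeWhile (fun p => p.2 == t)).map Prod.fst)
            :: groupRuns ((lines.map (fun ln => (ln, line_type ln))).dropWhile (fun p => p.2 == t)))) := by
  induction lines with
  | nil =>
    constructor
    · intro blocks ct; simp [runA_nil, addCur_nil, groupRuns]
    · intro blocks acc t hacc _ _
      simp [runA_nil, addCur_ne blocks acc hacc, groupRuns]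
  | cons l rest ih =>
    have hM : ∀ (blocks : List String) (ct : Option String),
        runA (blocks, [], ct) (l :: rest) = blocks ++ groupRuns ((l :: rest).map (fun ln => (ln, line_type ln))) := by
      intro blocks ct
      rw [runA_cons, mtbStep_empty]
      by_cases hp : line_type l = "heading" ∨ line_type l = "paragraph"
      · -- heading/paragraph line: it is flushed alone (or dropped if blank)
        by_cases hs : PySem.Chars.strip l.toList = []
        · rw [if_pos hs, ih.1]
          have hlt : line_type l = "paragraph" := strip_nil_lineType l hs
          simp [groupRuns, hlt, hs]
        · rw [if_neg hs]
          have hH : runA (blocks, [l], some (block_to_block_type l)) rest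
              = (blocks ++ [l]) ++ groupRuns (rest.map (fun ln => (ln, line_type ln))) := by
            cases rest with
            | nil => simp [runA_nil, addCur_ne _ [l] (by simp), str_join_singleton, groupRuns_nil]
            | cons l' r' =>
              have hcond : some (block_to_block_type l') ≠ some (block_to_block_type l)
                  ∨ block_to_block_type l' = "heading" ∨ block_to_block_type l' = "paragraph" := by
                by_cases he : block_to_block_type l' = block_to_block_type l
                · right
                  rw [he, classify_eq l]
                  exact hp
                · left; simpa using he
              rw [runA_cons, mtbStep_fire _ _ _ _ hcond,
                addCur_ne _ [l] (by simp), str_join_singleton, ← runA_cons]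
              exact ih.1 (blocks ++ [l]) (some (block_to_block_type l))
          rw [hH]
          simp [groupRuns, hp, hs]
      · -- a mergeable run starts here
        push_neg at hp
        have hs : PySem.Chars.strip l.toList ≠ [] := by
          intro hnil
          exact hp.2 ((classify_eq l) ▸ strip_nil_classify l hnil)
        rw [if_neg hs]
        rw [classify_eq l]
        rw [(ih.2 blocks [l] (line_type l) (by simp) hp.1 hp.2 : _)]
        simp [groupRuns, hp]
    refine ⟨hM, ?_⟩
    intro blocks acc t hacc h1 h2
    by_cases he : line_type l = t
    · -- same type: merge
      rw [runA_cons, mtbStep_merge _ _ _ _ ((classify_eq l).trans he) h1 h2,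
        ih.2 blocks (acc ++ [l]) t (by simp) h1 h2]
      simp [he]
    · -- different type: flush, then restart at this very line
      have hcond : some (block_to_block_type l) ≠ some t
          ∨ block_to_block_type l = "heading" ∨ block_to_block_type l = "paragraph" := by
        left; simp [classify_eq l, he]
      rw [runA_cons, mtbStep_fire _ _ _ _ hcond, addCur_ne _ _ hacc, ← runA_cons,
        hM (blocks ++ [PySem.Str.join "\n" acc]) (some t)]
      simp [he]

-- ===== VERDICT (by name: the statement is the Claim_ definition above) =====
theorem markdown_to_block_spec : Claim_equal_markdown_to_block := by
  intro markdown _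
  unfold Spec_markdown_to_block markdown_to_block markdown_to_block_alt
  exact (runA_groupRuns _).1 [] none
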